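-- pv_equiv track=rewrite | github.com/rongYin-git/cs61a-2021Fall | lab03/lab03.py | get_k_run_starter
-- ===== SOURCE A (Python) =====
-- def get_k_run_starter(n, k):
--     """
--     >>> get_k_run_starter(123444345, 0) # example from description
--     3
--     >>> get_k_run_starter(123444345, 1)
--     4
--     >>> get_k_run_starter(123444345, 2)
--     4
--     >>> get_k_run_starter(123444345, 3)
--     1
--     >>> get_k_run_starter(123412341234, 1)
--     1
--     >>> get_k_run_starter(1234234534564567, 0)
--     4
--     >>> get_k_run_starter(1234234534564567, 1)
--     3
--     >>> get_k_run_starter(1234234534564567, 2)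
--     2
--     """
--     i = 0
--     final = None
--     while i <= k:  # add stop point
--         #find i_th chunck # loop until cur_digit <= next_digit (cur_digit -> final)
--         while (n % 10) > ((n // 10) % 10) and ((n // 10) > 0): # add stop point, ##! and next one exists + n // 10 > 0
--             n //= 10
--         final = n % 10
--         i = i + 1
--         n = n // 10  ##! once find the 0th digit, cut it off and start with the rest
--     return final
-- ===== SOURCE B (Python) =====
-- def get_k_run_starter(n, k):
--     """Starting digit of the k-th maximal strictly-increasing digit run,
--     counted from the right; 0 when fewer than k+1 runs exist."""
--     digits = [int(c) for c in str(n)]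
--     starts = [i for i in range(len(digits)) if i == 0 or digits[i - 1] >= digits[i]]
--     starts.reverse()
--     return digits[starts[k]] if k < len(starts) else 0
-- ===== Notes on version B (the rewrite author's own statement) =====
-- stated objective: faster
-- what changed: B converts the number to its digit string once, selects the run-start positions with a single left-to-right comparison pass, and indexes the k-th one from the right, removing A's outer loop that peels one run per iteration by repeated floor division (O(k) iterations); Pre_ excludes negative k, where A returns None in place of an int, and negative n, where digit runs are undefined, A's value is an artefact of floor division on negatives and B raises ValueError on the minus sign.
-- outside the precondition, e.g. on get_k_run_starter(-53, 0): A returns 7, B raises ValueError; on get_k_run_starter(123, -1): A returns None, B returns 1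
import Mathlib
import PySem

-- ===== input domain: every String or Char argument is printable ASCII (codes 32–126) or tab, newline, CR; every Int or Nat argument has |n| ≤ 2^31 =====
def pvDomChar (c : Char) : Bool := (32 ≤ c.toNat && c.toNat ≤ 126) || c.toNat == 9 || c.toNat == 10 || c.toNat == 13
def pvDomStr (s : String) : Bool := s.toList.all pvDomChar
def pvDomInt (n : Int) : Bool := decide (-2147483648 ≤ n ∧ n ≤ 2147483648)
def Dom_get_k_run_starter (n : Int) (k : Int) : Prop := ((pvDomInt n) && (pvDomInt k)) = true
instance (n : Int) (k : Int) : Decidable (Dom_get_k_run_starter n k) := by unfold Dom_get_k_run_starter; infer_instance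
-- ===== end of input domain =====

-- B converts the number to its digit string once, picks the run-start positions in one
-- comparison pass and indexes the k-th from the right, instead of A's nested peeling loops.

-- ===== PORT A =====
-- inner `while (n % 10) > ((n // 10) % 10) and ((n // 10) > 0): n //= 10`
def pvInnerA (n : Int) : Int :=
  if PySem.Int.mod n 10 > PySem.Int.mod (PySem.Int.floordiv n 10) 10 ∧ PySem.Int.floordiv n 10 > 0 then
    pvInnerA (PySem.Int.floordiv n 10)
  else n
termination_by n.toNat
decreasing_by
  rename_i h
  have h10 : (0:Int) < 10 := by norm_num
  rw [PySem.Int.floordiv_eq_ediv_of_pos h10] at *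
  omega

-- outer `while i <= k:` — runs (k+1).toNat times (0 times when k < 0)
def pvOuterA (fuel : Nat) (n : Int) (final : Option Int) : Option Int :=
  match fuel with
  | 0 => final
  | f + 1 =>
    let n' := pvInnerA n
    pvOuterA f (PySem.Int.floordiv n' 10) (some (PySem.Int.mod n' 10))

def get_k_run_starter (n : Int) (k : Int) : Option Int :=
  pvOuterA (k + 1).toNat n none

-- ===== PORT B =====
def get_k_run_starter_alt (n : Int) (k : Int) : Option Int :=
  -- `digits = [int(c) for c in str(n)]`; PySem.Int.ofStr? is none exactly where int(c) raises
  match (PySem.Int.toStr n).toList.mapM (fun c => PySem.Int.ofStr? (String.mk [c])) with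
  | none => none
  | some digits =>
    -- `starts = [i for i in range(len(digits)) if i == 0 or digits[i-1] >= digits[i]]`
    -- the indices are nonnegative and in range (the `or` short-circuits before
    -- digits[i-1] is read), so Nat-valued range/getD are exact here
    let starts := (List.range digits.length).filter
      (fun i => i == 0 || decide (digits.getD i 0 ≤ digits.getD (i - 1) 0))
    -- `starts.reverse()`
    let startsRev := starts.reverse
    -- `return digits[starts[k]] if k < len(starts) else 0`
    if k < (startsRev.length : Int) then
      (PySem.List.pyGet? startsRev k).map (fun i => digits.getD i 0)
    else some 0

-- ===== PRECONDITION & SPEC =====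
-- Pre_ excludes negative k, where A returns None in place of an int, and negative n,
-- where digit runs are undefined, A's value there is an artefact of floor division on
-- negatives and B raises ValueError on the minus sign of str(n).
def Pre_get_k_run_starter (n : Int) (k : Int) : Prop := 0 ≤ n ∧ 0 ≤ k
instance (n : Int) (k : Int) : Decidable (Pre_get_k_run_starter n k) := by unfold Pre_get_k_run_starter; infer_instance
def pvWitness_get_k_run_starter : Int × Int := (123444345, 1)

def Spec_get_k_run_starter (n : Int) (k : Int) (out : Option Int) : Prop := out = get_k_run_starter_alt n k
instance (n : Int) (k : Int) (out : Option Int) : Decidable (Spec_get_k_run_starter n k out) := by unfold Spec_get_k_run_starter; infer_instance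

-- ===== CLAIM (what is proved, stated in full; the proofs are below) =====
def Claim_equal_get_k_run_starter : Prop := ∀ (n : Int) (k : Int), Dom_get_k_run_starter n k → Pre_get_k_run_starter n k → Spec_get_k_run_starter n k (get_k_run_starter n k)

-- ===== LEMMAS AND PROOFS =====

-- floor division/modulus by 10 in omega-friendly form
theorem pv_fd (a : Int) : PySem.Int.floordiv a 10 = a / 10 :=
  PySem.Int.floordiv_eq_ediv_of_pos (by norm_num)
theorem pv_md (a : Int) : PySem.Int.mod a 10 = a % 10 :=
  PySem.Int.mod_eq_emod_of_pos (by norm_num)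

-- `while n > 0`-style least-significant-first digit list (proof-side abstraction of A's peeling)
def pvDigits (n : Int) : List Int :=
  if _h : n > 0 then PySem.Int.mod n 10 :: pvDigits (PySem.Int.floordiv n 10) else []
termination_by n.toNat
decreasing_by
  have h10 : (0:Int) < 10 := by norm_num
  rw [PySem.Int.floordiv_eq_ediv_of_pos h10]
  omega

-- run starters scanned from the least-significant end
def pvStartersRec : List Int → List Int
  | [] => []
  | [d] => [d]
  | d :: e :: t => if d ≤ e then d :: pvStartersRec (e :: t) else pvStartersRec (e :: t)

theorem pvInnerA_zero : pvInnerA 0 = 0 := by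
  rw [pvInnerA]
  norm_num [pv_fd, pv_md]

theorem pvInnerA_nonneg_aux (m : Nat) : ∀ n : Int, n.toNat ≤ m → 0 ≤ n → 0 ≤ pvInnerA n := by
  induction m with
  | zero =>
    intro n h hn
    have h0 : n = 0 := by omega
    rw [h0, pvInnerA_zero]
  | succ m ih =>
    intro n h hn
    rw [pvInnerA]
    split
    · rename_i hc
      refine ih _ ?_ (by omega)
      have := hc.2
      rw [pv_fd] at *
      omega
    · exact hn

theorem pvInnerA_nonneg (n : Int) (hn : 0 ≤ n) : 0 ≤ pvInnerA n :=
  pvInnerA_nonneg_aux n.toNat n le_rfl hn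

-- the inner while loop finds the first run starter of the digit list
theorem pv_inner_starters_aux (m : Nat) : ∀ n : Int, n.toNat ≤ m → 0 < n →
    pvStartersRec (pvDigits n) =
      PySem.Int.mod (pvInnerA n) 10 ::
        pvStartersRec (pvDigits (PySem.Int.floordiv (pvInnerA n) 10)) := by
  induction m with
  | zero => intro n h hn; omega
  | succ m ih =>
    intro n h hn
    have hD : pvDigits n = PySem.Int.mod n 10 :: pvDigits (PySem.Int.floordiv n 10) := by
      rw [pvDigits]; rw [dif_pos hn]
    by_cases hr : PySem.Int.floordiv n 10 > 0
    · have hdig : pvDigits (PySem.Int.floordiv n 10) =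
          PySem.Int.mod (PySem.Int.floordiv n 10) 10 ::
            pvDigits (PySem.Int.floordiv (PySem.Int.floordiv n 10) 10) := by
        rw [pvDigits]; rw [dif_pos hr]
      by_cases hde : PySem.Int.mod n 10 > PySem.Int.mod (PySem.Int.floordiv n 10) 10
      · have hinner : pvInnerA n = pvInnerA (PySem.Int.floordiv n 10) := by
          rw [pvInnerA, if_pos ⟨hde, hr⟩]
        rw [hD, hdig, pvStartersRec, if_neg (by omega), ← hdig, hinner]
        refine ih _ ?_ hr
        rw [pv_fd] at *
        omega
      · have hinner : pvInnerA n = n := by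
          rw [pvInnerA, if_neg]
          rintro ⟨h1, -⟩
          exact hde h1
        rw [hD, hdig, pvStartersRec, if_pos (by omega), ← hdig, hinner]
    · have hinner : pvInnerA n = n := by
        rw [pvInnerA, if_neg]
        rintro ⟨-, h2⟩
        exact hr h2
      have hdig0 : pvDigits (PySem.Int.floordiv n 10) = [] := by
        rw [pvDigits]; rw [dif_neg hr]
      rw [hD, hdig0, hinner, hdig0]
      rfl

theorem pv_inner_starters (n : Int) (hn : 0 < n) :
    pvStartersRec (pvDigits n) =
      PySem.Int.mod (pvInnerA n) 10 ::
        pvStartersRec (pvDigits (PySem.Int.floordiv (pvInnerA n) 10)) :=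
  pv_inner_starters_aux n.toNat n le_rfl hn

theorem pvDigits_zero : pvDigits 0 = [] := by
  rw [pvDigits]; rfl

-- main invariant: A's outer loop with f+1 iterations yields the f-th run starter (0 past the end)
theorem pv_main (f : Nat) (n : Int) (hn : 0 ≤ n) (x : Option Int) :
    pvOuterA (f + 1) n x = some ((pvStartersRec (pvDigits n)).getD f 0) := by
  induction f generalizing n x with
  | zero =>
    show some (PySem.Int.mod (pvInnerA n) 10) = _
    by_cases h0 : n = 0
    · rw [h0, pvInnerA_zero, pvDigits_zero]
      simp [pvStartersRec]
    · rw [pv_inner_starters n (by omega)]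
      rfl
  | succ f ih =>
    rw [show pvOuterA (f + 1 + 1) n x =
          pvOuterA (f + 1) (PySem.Int.floordiv (pvInnerA n) 10)
            (some (PySem.Int.mod (pvInnerA n) 10)) from rfl]
    have hin : 0 ≤ pvInnerA n := pvInnerA_nonneg n hn
    rw [ih (PySem.Int.floordiv (pvInnerA n) 10) (by rw [pv_fd]; omega)]
    by_cases h0 : n = 0
    · rw [h0, pvInnerA_zero, show PySem.Int.floordiv 0 10 = 0 by rw [pv_fd]; rfl, pvDigits_zero]
      rfl
    · rw [pv_inner_starters n (by omega), List.getD_cons_succ]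

-- ===== B-side lemmas =====

-- least-significant-first Nat digit list
def pvNd (m : Nat) : List Nat :=
  if _h : m = 0 then [] else m % 10 :: pvNd (m / 10)
decreasing_by exact Nat.div_lt_self (by omega) (by norm_num)

-- most-significant-first char list, the shape Nat.toDigits produces
def pvMsb (m : Nat) : List Char :=
  if _h : m < 10 then [Nat.digitChar m] else pvMsb (m / 10) ++ [Nat.digitChar (m % 10)]
decreasing_by exact Nat.div_lt_self (by omega) (by norm_num)

theorem pv_toDigitsCore_eq (f : Nat) : ∀ (m : Nat) (l : List Char), m < f →
    Nat.toDigitsCore 10 f m l = pvMsb m ++ l := by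
  induction f with
  | zero => intro m l h; omega
  | succ f ih =>
    intro m l h
    rw [Nat.toDigitsCore]
    by_cases h10 : m < 10
    · have h0 : m / 10 = 0 := Nat.div_eq_of_lt h10
      simp only [h0]
      rw [pvMsb, dif_pos h10, Nat.mod_eq_of_lt h10]
      rfl
    · have hne : m / 10 ≠ 0 := by intro h0; exact h10 (by omega)
      simp only [if_neg hne]
      rw [ih (m / 10) _ (by omega)]
      conv_rhs => rw [pvMsb, dif_neg h10]
      rw [List.append_assoc]
      rfl

theorem pv_toDigits_eq (m : Nat) : Nat.toDigits 10 m = pvMsb m := by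
  have := pv_toDigitsCore_eq (m + 1) m [] (by omega)
  simpa [Nat.toDigits] using this

theorem pv_msb_eq (m : Nat) (hm : m ≠ 0) :
    pvMsb m = ((pvNd m).map Nat.digitChar).reverse := by
  induction m using Nat.strong_induction_on with
  | _ m ih =>
    rw [pvMsb, pvNd, dif_neg hm]
    by_cases h10 : m < 10
    · have h0 : m / 10 = 0 := Nat.div_eq_of_lt h10
      rw [dif_pos h10, h0, pvNd, dif_pos rfl, Nat.mod_eq_of_lt h10]
      rfl
    · have hne : m / 10 ≠ 0 := by intro h0; exact h10 (by omega)
      rw [dif_neg h10, ih (m / 10) (Nat.div_lt_self (by omega) (by norm_num)) hne]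
      simp

theorem pv_nd_lt (m : Nat) : ∀ d ∈ pvNd m, d < 10 := by
  induction m using Nat.strong_induction_on with
  | _ m ih =>
    intro d hd
    rw [pvNd] at hd
    by_cases h0 : m = 0
    · simp [h0] at hd
    · rw [dif_neg h0] at hd
      rcases List.mem_cons.mp hd with h | h
      · subst h; exact Nat.mod_lt _ (by norm_num)
      · exact ih (m / 10) (Nat.div_lt_self (by omega) (by norm_num)) d h

theorem pv_decode (d : Nat) (h : d < 10) :
    PySem.Int.ofStr? (String.mk [Nat.digitChar d]) = some (d : Int) := by
  interval_cases d <;> decide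

theorem pv_mapM_decode (ks : List Nat) (h : ∀ d ∈ ks, d < 10) :
    List.mapM (fun c => PySem.Int.ofStr? (String.mk [c])) (ks.map Nat.digitChar)
      = some (ks.map Int.ofNat) := by
  induction ks with
  | nil => rfl
  | cons a t ih =>
    simp only [List.map_cons, List.mapM_cons, pv_decode a (h a (by simp)),
      ih (fun d hd => h d (by simp [hd]))]
    rfl

theorem pv_digits_eq_aux (m : Nat) : ∀ n : Int, n.toNat ≤ m → 0 ≤ n →
    pvDigits n = (pvNd n.toNat).map Int.ofNat := by
  induction m with
  | zero =>
    intro n h hn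
    have h0 : n = 0 := by omega
    subst h0
    rw [pvDigits, dif_neg (by norm_num), pvNd]
    rfl
  | succ m ih =>
    intro n h hn
    by_cases h0 : n = 0
    · subst h0
      rw [pvDigits, dif_neg (by norm_num), pvNd]
      rfl
    · have hpos : 0 < n := by omega
      rw [pvDigits, dif_pos hpos]
      rw [pvNd, dif_neg (by omega)]
      have e1 : PySem.Int.mod n 10 = ((n.toNat % 10 : Nat) : Int) := by
        rw [PySem.Int.mod_eq_emod_of_pos (by norm_num)]
        omega
      have e2 : PySem.Int.floordiv n 10 = ((n.toNat / 10 : Nat) : Int) := by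
        rw [PySem.Int.floordiv_eq_ediv_of_pos (by norm_num)]
        omega
      rw [e1, e2, ih _ (by omega) (by positivity), List.map_cons]
      have e3 : ((( (n.toNat / 10 : Nat) : Int)).toNat) = n.toNat / 10 := by omega
      rw [e3]
      rfl

theorem pv_digits_eq (n : Int) (hn : 0 ≤ n) :
    pvDigits n = (pvNd n.toNat).map Int.ofNat :=
  pv_digits_eq_aux n.toNat n le_rfl hn

-- B's start positions of a digit list
def pvBStarts (D : List Int) : List Nat :=
  (List.range D.length).filter (fun i => i == 0 || decide (D.getD i 0 ≤ D.getD (i - 1) 0))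

-- the digits at B's reversed start positions are exactly the starters scanned from the right
theorem pv_bval (ds : List Int) :
    ((pvBStarts ds.reverse).reverse).map (fun i => ds.reverse.getD i 0) = pvStartersRec ds := by
  induction ds with
  | nil => rfl
  | cons d t ih =>
    cases t with
    | nil => simp [pvBStarts, pvStartersRec, List.range_succ]
    | cons e t' =>
      set L := (e :: t').length with hL
      have hDrev : (d :: e :: t').reverse = (e :: t').reverse ++ [d] := by simp
      have hlen : (d :: e :: t').reverse.length = L + 1 := by simp [hL]
      have hrevlen : (e :: t').reverse.length = L := by simp [hL]
      have hL1 : L = t'.length + 1 := by simp [hL]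
      -- predicate agreement on indices below L
      have hpred : ∀ i ∈ List.range L,
          (decide (i = 0) || decide ((d :: e :: t').reverse.getD i 0 ≤ (d :: e :: t').reverse.getD (i - 1) 0))
          = (decide (i = 0) || decide ((e :: t').reverse.getD i 0 ≤ (e :: t').reverse.getD (i - 1) 0)) := by
        intro i hi
        have hiL : i < L := List.mem_range.mp hi
        by_cases hi0 : i = 0
        · simp [hi0]
        · have h1 : i - 1 < L := by omega
          rw [hDrev, List.getD_append _ _ _ _ (by omega), List.getD_append _ _ _ _ (by omega)]
      have hsplit : pvBStarts (d :: e :: t').reverse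
          = pvBStarts (e :: t').reverse ++ (if d ≤ e then [L] else []) := by
        unfold pvBStarts
        rw [hlen, hrevlen, List.range_succ, List.filter_append]
        congr 1
        · exact List.filter_congr (by
            intro i hi
            simpa using hpred i hi)
        · have hgL : (d :: e :: t').reverse.getD L 0 = d := by
            rw [hDrev, List.getD_append_right _ _ _ _ (by omega)]
            have hz : L - (t'.length + 1) = 0 := by omega
            simp [hz]
          have hgL1 : (d :: e :: t').reverse.getD (L - 1) 0 = e := by
            rw [hDrev, List.getD_append _ _ _ _ (by simp [hL])]
            have : (e :: t').reverse = t'.reverse ++ [e] := by simp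
            rw [this, List.getD_append_right _ _ _ _ (by simp [hL])]
            simp [hL]
          simp only [List.filter, hgL, hgL1]
          by_cases hde : d ≤ e
          · simp [hde, hL]
          · simp [hde, hL]
      rw [hsplit, List.reverse_append, List.map_append]
      have hmain : ((pvBStarts (e :: t').reverse).reverse).map (fun i => (d :: e :: t').reverse.getD i 0)
          = pvStartersRec (e :: t') := by
        rw [← ih]
        refine List.map_congr_left ?_
        intro i hi
        have hiL : i < L := by
          have := List.mem_reverse.mp hi
          have := List.mem_range.mp (List.mem_of_mem_filter this)
          omega
        rw [hDrev, List.getD_append _ _ _ _ (by omega)]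
      rw [hmain]
      by_cases hde : d ≤ e
      · simp only [if_pos hde, List.reverse_cons, List.reverse_nil, List.nil_append, List.map_cons, List.map_nil]
        have g1 : (t'.reverse ++ [e] ++ [d]).getD L 0 = d := by
          rw [List.getD_append_right _ _ _ _ (by simp [hL])]
          simp [hL]
        rw [g1]
        rw [show pvStartersRec (d :: e :: t') = d :: pvStartersRec (e :: t') from by
          rw [pvStartersRec, if_pos hde]]
        rfl
      · simp only [if_neg hde, List.reverse_nil, List.map_nil]
        rw [show pvStartersRec (d :: e :: t') = pvStartersRec (e :: t') from by
          rw [pvStartersRec, if_neg hde]]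
        rfl


-- B's body after the digit list is known: the if/indexing equals a getD into the mapped starter list
theorem pv_alt_body (D : List Int) (k : Int) (hk : 0 ≤ k) :
    (if k < (((pvBStarts D).reverse.length : Nat) : Int) then
        (PySem.List.pyGet? (pvBStarts D).reverse k).map (fun i => D.getD i 0)
      else some 0)
    = some ((((pvBStarts D).reverse).map (fun i => D.getD i 0)).getD k.toNat 0) := by
  by_cases hkl : k < (((pvBStarts D).reverse.length : Nat) : Int)
  · have hklt : k.toNat < (pvBStarts D).reverse.length := by omega
    have hkc : k = ((k.toNat : Nat) : Int) := by omega
    rw [if_pos hkl, hkc, PySem.List.pyGet?_natCast,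
      List.getElem?_eq_getElem hklt, Option.map_some]
    conv_rhs => rw [List.getD_eq_getElem _ _ (by rw [List.length_map]; exact hklt), List.getElem_map]
    simp only [Int.toNat_natCast]
  · rw [if_neg hkl, List.getD_eq_default _ _ (by rw [List.length_map]; omega)]

theorem pv_alt_eq (n : Int) (k : Int) (hk : 0 ≤ k) (D : List Int)
    (hD : (PySem.Int.toStr n).toList.mapM (fun c => PySem.Int.ofStr? (String.mk [c])) = some D) :
    get_k_run_starter_alt n k
      = some ((((pvBStarts D).reverse).map (fun i => D.getD i 0)).getD k.toNat 0) := by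
  unfold get_k_run_starter_alt
  rw [hD]
  exact pv_alt_body D k hk

-- ===== VERDICT (by name: the statement is the Claim_ definition above) =====
theorem get_k_run_starter_spec : Claim_equal_get_k_run_starter := by
  intro n k _ hpre
  obtain ⟨hn, hk⟩ := hpre
  unfold Spec_get_k_run_starter get_k_run_starter
  have hf : (k + 1).toNat = k.toNat + 1 := by omega
  rw [hf, pv_main k.toNat n hn]
  have hchars : (PySem.Int.toStr n).toList = pvMsb n.toNat := by
    rw [PySem.Int.toList_toStr, PySem.Int.toChars, if_neg (by omega), pv_toDigits_eq]
  by_cases h0 : n = 0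
  · subst h0
    have hm0 : pvMsb (0 : Int).toNat = ['0'] := by
      rw [show (0 : Int).toNat = 0 from rfl, pvMsb]
      decide
    have hmm : (PySem.Int.toStr 0).toList.mapM (fun c => PySem.Int.ofStr? (String.mk [c]))
        = some [(0 : Int)] := by
      rw [hchars, hm0]; decide
    rw [pv_alt_eq 0 k hk [(0 : Int)] hmm, pvDigits_zero]
    have hmap0 : (((pvBStarts [(0 : Int)]).reverse).map (fun i => [(0 : Int)].getD i 0)) = [0] := by
      decide
    rw [hmap0]
    cases k.toNat <;> rfl
  · have hm : n.toNat ≠ 0 := by omega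
    have hmsb : pvMsb n.toNat = ((pvNd n.toNat).reverse).map Nat.digitChar := by
      rw [pv_msb_eq n.toNat hm, List.map_reverse]
    have hmm : (PySem.Int.toStr n).toList.mapM (fun c => PySem.Int.ofStr? (String.mk [c]))
        = some ((pvDigits n).reverse) := by
      rw [hchars, hmsb, pv_mapM_decode _ (fun d hd => pv_nd_lt n.toNat d (List.mem_reverse.mp hd))]
      rw [pv_digits_eq n hn, List.map_reverse]
    rw [pv_alt_eq n k hk _ hmm]
    rw [show ((pvBStarts (pvDigits n).reverse).reverse).map (fun i => (pvDigits n).reverse.getD i 0)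
          = pvStartersRec (pvDigits n) from pv_bval (pvDigits n)]
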